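-- pv_equiv track=rewrite | github.com/pypi-data/pypi-mirror-396 | packages/crawlerx/crawlerx-1.1.1-py3-none-any.whl/crawlerx/crawlerx.py | categorize_resource
-- ===== SOURCE A (Python) =====
-- def categorize_resource(url):
--     """Categorize resource by file extension"""
--     url_lower = url.lower()
--
--     if any(url_lower.endswith(ext) for ext in ['.jpg', '.jpeg', '.png', '.gif', '.svg', '.webp', '.ico', '.bmp']):
--         return 'images'
--     elif url_lower.endswith('.js'):
--         return 'scripts'
--     elif url_lower.endswith('.css'):
--         return 'stylesheets'
--     elif any(url_lower.endswith(ext) for ext in ['.woff', '.woff2', '.ttf', '.eot', '.otf']):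
--         return 'fonts'
--     elif any(url_lower.endswith(ext) for ext in ['.mp4', '.mp3', '.webm', '.ogg', '.wav', '.avi']):
--         return 'media'
--     elif any(url_lower.endswith(ext) for ext in ['.pdf', '.doc', '.docx', '.xls', '.xlsx', '.zip', '.tar', '.gz']):
--         return 'documents'
--     else:
--         return 'other'
-- ===== SOURCE B (Python) =====
-- _CATEGORIES = {
--     '.jpg': 'images', '.jpeg': 'images', '.png': 'images', '.gif': 'images',
--     '.svg': 'images', '.webp': 'images', '.ico': 'images', '.bmp': 'images',
--     '.js': 'scripts',
--     '.css': 'stylesheets',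
--     '.woff': 'fonts', '.woff2': 'fonts', '.ttf': 'fonts', '.eot': 'fonts', '.otf': 'fonts',
--     '.mp4': 'media', '.mp3': 'media', '.webm': 'media', '.ogg': 'media', '.wav': 'media', '.avi': 'media',
--     '.pdf': 'documents', '.doc': 'documents', '.docx': 'documents', '.xls': 'documents',
--     '.xlsx': 'documents', '.zip': 'documents', '.tar': 'documents', '.gz': 'documents',
-- }
--
-- def categorize_resource(url):
--     """Categorize resource by file extension"""
--     url_lower = url.lower()
--     i = url_lower.rfind('.')
--     if i == -1:
--         return 'other'
--     return _CATEGORIES.get(url_lower[i:], 'other')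
-- ===== Notes on version B (the rewrite author's own statement) =====
-- stated objective: idiomatic
-- what changed: Replaces the six chained any(endswith) scans over 27 extensions by a single module-level extension-to-category dict keyed on the lowercased suffix from the last dot (rfind), computed once and looked up once.
import Mathlib
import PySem

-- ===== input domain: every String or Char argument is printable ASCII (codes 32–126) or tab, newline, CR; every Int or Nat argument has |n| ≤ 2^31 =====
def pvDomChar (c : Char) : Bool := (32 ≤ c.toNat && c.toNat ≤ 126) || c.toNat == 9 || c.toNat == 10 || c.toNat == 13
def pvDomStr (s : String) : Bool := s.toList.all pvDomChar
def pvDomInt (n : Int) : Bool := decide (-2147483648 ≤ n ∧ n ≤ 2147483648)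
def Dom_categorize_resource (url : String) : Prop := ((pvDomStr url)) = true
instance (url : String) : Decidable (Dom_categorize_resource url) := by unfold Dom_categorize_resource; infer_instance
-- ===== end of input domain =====

-- B replaces A's six chains of endswith scans by one extension→category table keyed by the suffix
-- from the last dot (idiomatic; same result because every key is a single dot-segment).

-- ===== PORT A =====
def categorize_resource (url : String) : String :=
  let url_lower := PySem.Str.lower url
  if [".jpg", ".jpeg", ".png", ".gif", ".svg", ".webp", ".ico", ".bmp"].any
      (fun ext => PySem.Str.endswith url_lower ext) then "images"
  else if PySem.Str.endswith url_lower ".js" then "scripts"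
  else if PySem.Str.endswith url_lower ".css" then "stylesheets"
  else if [".woff", ".woff2", ".ttf", ".eot", ".otf"].any
      (fun ext => PySem.Str.endswith url_lower ext) then "fonts"
  else if [".mp4", ".mp3", ".webm", ".ogg", ".wav", ".avi"].any
      (fun ext => PySem.Str.endswith url_lower ext) then "media"
  else if [".pdf", ".doc", ".docx", ".xls", ".xlsx", ".zip", ".tar", ".gz"].any
      (fun ext => PySem.Str.endswith url_lower ext) then "documents"
  else "other"

-- ===== PORT B =====
def pvCategories : PySem.Dict String String :=
  ⟨[(".jpg", "images"), (".jpeg", "images"), (".png", "images"), (".gif", "images"), (".svg", "images"), (".webp", "images"), (".ico", "images"), (".bmp", "images"), (".js", "scripts"), (".css", "stylesheets"), (".woff", "fonts"), (".woff2", "fonts"), (".ttf", "fonts"), (".eot", "fonts"), (".otf", "fonts"), (".mp4", "media"), (".mp3", "media"), (".webm", "media"), (".ogg", "media"), (".wav", "media"), (".avi", "media"), (".pdf", "documents"), (".doc", "documents"), (".docx", "documents"), (".xls", "documents"), (".xlsx", "documents"), (".zip", "documents"), (".tar", "documents"), (".gz", "documents")]⟩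

def categorize_resource_alt (url : String) : String :=
  let url_lower := PySem.Str.lower url
  let i := PySem.Str.rfind url_lower "."
  if i == -1 then "other"
  else PySem.Dict.getD pvCategories (PySem.Str.slice url_lower (some i) none) "other"

-- ===== PRECONDITION & SPEC =====
def Spec_categorize_resource (url : String) (out : String) : Prop := out = categorize_resource_alt url
instance (url : String) (out : String) : Decidable (Spec_categorize_resource url out) := by unfold Spec_categorize_resource; infer_instance

-- ===== CLAIM (what is proved, stated in full; the proofs are below) =====
def Claim_equal_categorize_resource : Prop := ∀ (url : String), Dom_categorize_resource url → Spec_categorize_resource url (categorize_resource url)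

-- ===== LEMMAS AND PROOFS =====

-- ['.'] is a prefix of s iff s starts with '.'
lemma prefix_dot_iff (s : List Char) : ['.'].isPrefixOf s = true ↔ ∃ r, s = '.' :: r := by
  rw [List.isPrefixOf_iff_prefix]
  cases s with
  | nil => simp
  | cons c cs => simp [List.cons_prefix_iff]

-- rfind's accumulator loop returns -1 or a nonnegative index
lemma go_neg_one_or_nonneg (s sub : List Char) (k : Nat) :
    PySem.Chars.rfind.go s sub k = -1 ∨ 0 ≤ PySem.Chars.rfind.go s sub k := by
  induction k with
  | zero =>
    rw [PySem.Chars.rfind.go]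
    split
    · right; omega
    · left; rfl
  | succ j ih =>
    rw [PySem.Chars.rfind.go]
    split
    · right; omega
    · exact ih

-- on p ++ '.'::w with no dot in w, the loop started at any k ≥ |p| lands on |p|
lemma go_last_dot (p w : List Char) (hw : '.' ∉ w) :
    ∀ k, p.length ≤ k → PySem.Chars.rfind.go (p ++ '.' :: w) ['.'] k = (p.length : Int) := by
  intro k
  induction k with
  | zero =>
    intro h0
    have hp : p = [] := List.length_eq_zero_iff.mp (Nat.le_zero.mp h0)
    subst hp
    rw [PySem.Chars.rfind.go]
    simp
  | succ j ih =>
    intro hle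
    rw [PySem.Chars.rfind.go]
    by_cases hc : p.length = j + 1
    · simp [hc]
    · have hpl : p.length ≤ j := by omega
      have hd : List.drop (j + 1) (p ++ '.' :: w) = List.drop (j - p.length) w := by
        rw [show j + 1 = p.length + (j - p.length + 1) from by omega, List.drop_append,
          List.drop_eq_nil_of_le (by omega), List.nil_append, Nat.add_sub_cancel_left,
          List.drop_succ_cons]
      have hnp : ¬ ['.'].isPrefixOf (List.drop (j + 1) (p ++ '.' :: w)) = true := by
        rw [prefix_dot_iff]
        rintro ⟨r, hr⟩
        apply hw
        have hm : '.' ∈ List.drop (j - p.length) w := by rw [← hd, hr]; exact List.mem_cons_self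
        exact List.drop_subset _ _ hm
      simp [hnp, ih hpl]

-- rfind of '.' on a string that ends with '.'::w (w dot-free) is exactly the split point
lemma rfind_of_suffix (l p w : List Char) (h : l = p ++ '.' :: w) (hw : '.' ∉ w) :
    PySem.Chars.rfind l ['.'] = (p.length : Int) := by
  subst h
  exact go_last_dot p w hw _ (by simp)

-- endswith '.'::w (w dot-free) ⟺ the suffix from the last dot is exactly '.'::w
lemma ends_iff (l w : List Char) (hw : '.' ∉ w) :
    PySem.Chars.endswith l ('.' :: w) = true ↔
      (PySem.Chars.rfind l ['.'] ≠ -1 ∧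
        l.drop (PySem.Chars.rfind l ['.']).toNat = '.' :: w) := by
  constructor
  · intro h
    have hs : '.' :: w <:+ l := by
      simpa [PySem.Chars.endswith, List.isSuffixOf_iff_suffix] using h
    obtain ⟨p, hp⟩ := hs
    have hr := rfind_of_suffix l p w hp.symm hw
    refine ⟨by rw [hr]; omega, ?_⟩
    rw [hr, Int.toNat_natCast, ← hp, List.drop_left]
  · rintro ⟨-, hd⟩
    have hs : '.' :: w <:+ l :=
      ⟨l.take (PySem.Chars.rfind l ['.']).toNat, by rw [← hd]; exact List.take_append_drop _ _⟩
    simpa [PySem.Chars.endswith, List.isSuffixOf_iff_suffix] using hs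

-- Bool form of ends_iff once the last dot exists
lemma ends_eq (l w : List Char) (hw : '.' ∉ w) (hi : PySem.Chars.rfind l ['.'] ≠ -1) :
    PySem.Chars.endswith l ('.' :: w) =
      decide (l.drop (PySem.Chars.rfind l ['.']).toNat = '.' :: w) := by
  by_cases h : l.drop (PySem.Chars.rfind l ['.']).toNat = '.' :: w
  · simp only [h, decide_true]
    exact (ends_iff l w hw).mpr ⟨hi, h⟩
  · simp only [h, decide_false]
    rw [Bool.eq_false_iff]
    intro hc
    exact h ((ends_iff l w hw).mp hc).2

-- all endswith tests fail when the string has no last dot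
lemma ends_false (l w : List Char) (hw : '.' ∉ w) (hi : PySem.Chars.rfind l ['.'] = -1) :
    PySem.Chars.endswith l ('.' :: w) = false := by
  rw [Bool.eq_false_iff]
  intro hc
  exact ((ends_iff l w hw).mp hc).1 hi

-- a String-literal key is BEq-different from ofList t when the char lists differ
lemma beq_ofList_false (s : String) (t : List Char) (h : t ≠ s.toList) :
    (s == String.ofList t) = false := by
  rw [beq_eq_false_iff_ne]
  intro he
  exact h (by rw [he, String.toList_ofList])

-- ===== VERDICT (by name: the statement is the Claim_ definition above) =====
theorem categorize_resource_spec : Claim_equal_categorize_resource := by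
  intro url _
  unfold Spec_categorize_resource categorize_resource categorize_resource_alt
  simp only [PySem.Str.endswith_eq, PySem.Str.rfind_eq, PySem.Str.toList_lower, PySem.Str.slice,
    List.any_cons, List.any_nil, Bool.or_false,
    show (".jpg" : String).toList = ['.', 'j', 'p', 'g'] from rfl,
    show (".jpeg" : String).toList = ['.', 'j', 'p', 'e', 'g'] from rfl,
    show (".png" : String).toList = ['.', 'p', 'n', 'g'] from rfl,
    show (".gif" : String).toList = ['.', 'g', 'i', 'f'] from rfl,
    show (".svg" : String).toList = ['.', 's', 'v', 'g'] from rfl,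
    show (".webp" : String).toList = ['.', 'w', 'e', 'b', 'p'] from rfl,
    show (".ico" : String).toList = ['.', 'i', 'c', 'o'] from rfl,
    show (".bmp" : String).toList = ['.', 'b', 'm', 'p'] from rfl,
    show (".js" : String).toList = ['.', 'j', 's'] from rfl,
    show (".css" : String).toList = ['.', 'c', 's', 's'] from rfl,
    show (".woff" : String).toList = ['.', 'w', 'o', 'f', 'f'] from rfl,
    show (".woff2" : String).toList = ['.', 'w', 'o', 'f', 'f', '2'] from rfl,
    show (".ttf" : String).toList = ['.', 't', 't', 'f'] from rfl,
    show (".eot" : String).toList = ['.', 'e', 'o', 't'] from rfl,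
    show (".otf" : String).toList = ['.', 'o', 't', 'f'] from rfl,
    show (".mp4" : String).toList = ['.', 'm', 'p', '4'] from rfl,
    show (".mp3" : String).toList = ['.', 'm', 'p', '3'] from rfl,
    show (".webm" : String).toList = ['.', 'w', 'e', 'b', 'm'] from rfl,
    show (".ogg" : String).toList = ['.', 'o', 'g', 'g'] from rfl,
    show (".wav" : String).toList = ['.', 'w', 'a', 'v'] from rfl,
    show (".avi" : String).toList = ['.', 'a', 'v', 'i'] from rfl,
    show (".pdf" : String).toList = ['.', 'p', 'd', 'f'] from rfl,
    show (".doc" : String).toList = ['.', 'd', 'o', 'c'] from rfl,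
    show (".docx" : String).toList = ['.', 'd', 'o', 'c', 'x'] from rfl,
    show (".xls" : String).toList = ['.', 'x', 'l', 's'] from rfl,
    show (".xlsx" : String).toList = ['.', 'x', 'l', 's', 'x'] from rfl,
    show (".zip" : String).toList = ['.', 'z', 'i', 'p'] from rfl,
    show (".tar" : String).toList = ['.', 't', 'a', 'r'] from rfl,
    show (".gz" : String).toList = ['.', 'g', 'z'] from rfl,
    show ("." : String).toList = ['.'] from rfl]
  generalize PySem.Chars.lower url.toList = l
  by_cases hi : PySem.Chars.rfind l ['.'] = -1
  · simp [hi,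
      ends_false l ['j', 'p', 'g'] (by decide) hi,
      ends_false l ['j', 'p', 'e', 'g'] (by decide) hi,
      ends_false l ['p', 'n', 'g'] (by decide) hi,
      ends_false l ['g', 'i', 'f'] (by decide) hi,
      ends_false l ['s', 'v', 'g'] (by decide) hi,
      ends_false l ['w', 'e', 'b', 'p'] (by decide) hi,
      ends_false l ['i', 'c', 'o'] (by decide) hi,
      ends_false l ['b', 'm', 'p'] (by decide) hi,
      ends_false l ['j', 's'] (by decide) hi,
      ends_false l ['c', 's', 's'] (by decide) hi,
      ends_false l ['w', 'o', 'f', 'f'] (by decide) hi,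
      ends_false l ['w', 'o', 'f', 'f', '2'] (by decide) hi,
      ends_false l ['t', 't', 'f'] (by decide) hi,
      ends_false l ['e', 'o', 't'] (by decide) hi,
      ends_false l ['o', 't', 'f'] (by decide) hi,
      ends_false l ['m', 'p', '4'] (by decide) hi,
      ends_false l ['m', 'p', '3'] (by decide) hi,
      ends_false l ['w', 'e', 'b', 'm'] (by decide) hi,
      ends_false l ['o', 'g', 'g'] (by decide) hi,
      ends_false l ['w', 'a', 'v'] (by decide) hi,
      ends_false l ['a', 'v', 'i'] (by decide) hi,
      ends_false l ['p', 'd', 'f'] (by decide) hi,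
      ends_false l ['d', 'o', 'c'] (by decide) hi,
      ends_false l ['d', 'o', 'c', 'x'] (by decide) hi,
      ends_false l ['x', 'l', 's'] (by decide) hi,
      ends_false l ['x', 'l', 's', 'x'] (by decide) hi,
      ends_false l ['z', 'i', 'p'] (by decide) hi,
      ends_false l ['t', 'a', 'r'] (by decide) hi,
      ends_false l ['g', 'z'] (by decide) hi]
  · have hnn : 0 ≤ PySem.Chars.rfind l ['.'] := (go_neg_one_or_nonneg _ _ _).resolve_left hi
    rw [ends_eq l ['j', 'p', 'g'] (by decide) hi]
    rw [ends_eq l ['j', 'p', 'e', 'g'] (by decide) hi]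
    rw [ends_eq l ['p', 'n', 'g'] (by decide) hi]
    rw [ends_eq l ['g', 'i', 'f'] (by decide) hi]
    rw [ends_eq l ['s', 'v', 'g'] (by decide) hi]
    rw [ends_eq l ['w', 'e', 'b', 'p'] (by decide) hi]
    rw [ends_eq l ['i', 'c', 'o'] (by decide) hi]
    rw [ends_eq l ['b', 'm', 'p'] (by decide) hi]
    rw [ends_eq l ['j', 's'] (by decide) hi]
    rw [ends_eq l ['c', 's', 's'] (by decide) hi]
    rw [ends_eq l ['w', 'o', 'f', 'f'] (by decide) hi]
    rw [ends_eq l ['w', 'o', 'f', 'f', '2'] (by decide) hi]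
    rw [ends_eq l ['t', 't', 'f'] (by decide) hi]
    rw [ends_eq l ['e', 'o', 't'] (by decide) hi]
    rw [ends_eq l ['o', 't', 'f'] (by decide) hi]
    rw [ends_eq l ['m', 'p', '4'] (by decide) hi]
    rw [ends_eq l ['m', 'p', '3'] (by decide) hi]
    rw [ends_eq l ['w', 'e', 'b', 'm'] (by decide) hi]
    rw [ends_eq l ['o', 'g', 'g'] (by decide) hi]
    rw [ends_eq l ['w', 'a', 'v'] (by decide) hi]
    rw [ends_eq l ['a', 'v', 'i'] (by decide) hi]
    rw [ends_eq l ['p', 'd', 'f'] (by decide) hi]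
    rw [ends_eq l ['d', 'o', 'c'] (by decide) hi]
    rw [ends_eq l ['d', 'o', 'c', 'x'] (by decide) hi]
    rw [ends_eq l ['x', 'l', 's'] (by decide) hi]
    rw [ends_eq l ['x', 'l', 's', 'x'] (by decide) hi]
    rw [ends_eq l ['z', 'i', 'p'] (by decide) hi]
    rw [ends_eq l ['t', 'a', 'r'] (by decide) hi]
    rw [ends_eq l ['g', 'z'] (by decide) hi]
    simp only [PySem.Chars.slice_eq_listSlice, PySem.List.slice_from _ hnn, hi,
      beq_iff_eq]
    generalize List.drop (PySem.Chars.rfind l ['.']).toNat l = t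
    by_cases h1 : t = ['.', 'j', 'p', 'g']
    · subst h1; decide
    by_cases h2 : t = ['.', 'j', 'p', 'e', 'g']
    · subst h2; decide
    by_cases h3 : t = ['.', 'p', 'n', 'g']
    · subst h3; decide
    by_cases h4 : t = ['.', 'g', 'i', 'f']
    · subst h4; decide
    by_cases h5 : t = ['.', 's', 'v', 'g']
    · subst h5; decide
    by_cases h6 : t = ['.', 'w', 'e', 'b', 'p']
    · subst h6; decide
    by_cases h7 : t = ['.', 'i', 'c', 'o']
    · subst h7; decide
    by_cases h8 : t = ['.', 'b', 'm', 'p']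
    · subst h8; decide
    by_cases h9 : t = ['.', 'j', 's']
    · subst h9; decide
    by_cases h10 : t = ['.', 'c', 's', 's']
    · subst h10; decide
    by_cases h11 : t = ['.', 'w', 'o', 'f', 'f']
    · subst h11; decide
    by_cases h12 : t = ['.', 'w', 'o', 'f', 'f', '2']
    · subst h12; decide
    by_cases h13 : t = ['.', 't', 't', 'f']
    · subst h13; decide
    by_cases h14 : t = ['.', 'e', 'o', 't']
    · subst h14; decide
    by_cases h15 : t = ['.', 'o', 't', 'f']
    · subst h15; decide
    by_cases h16 : t = ['.', 'm', 'p', '4']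
    · subst h16; decide
    by_cases h17 : t = ['.', 'm', 'p', '3']
    · subst h17; decide
    by_cases h18 : t = ['.', 'w', 'e', 'b', 'm']
    · subst h18; decide
    by_cases h19 : t = ['.', 'o', 'g', 'g']
    · subst h19; decide
    by_cases h20 : t = ['.', 'w', 'a', 'v']
    · subst h20; decide
    by_cases h21 : t = ['.', 'a', 'v', 'i']
    · subst h21; decide
    by_cases h22 : t = ['.', 'p', 'd', 'f']
    · subst h22; decide
    by_cases h23 : t = ['.', 'd', 'o', 'c']
    · subst h23; decide
    by_cases h24 : t = ['.', 'd', 'o', 'c', 'x']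
    · subst h24; decide
    by_cases h25 : t = ['.', 'x', 'l', 's']
    · subst h25; decide
    by_cases h26 : t = ['.', 'x', 'l', 's', 'x']
    · subst h26; decide
    by_cases h27 : t = ['.', 'z', 'i', 'p']
    · subst h27; decide
    by_cases h28 : t = ['.', 't', 'a', 'r']
    · subst h28; decide
    by_cases h29 : t = ['.', 'g', 'z']
    · subst h29; decide
    · simp [pvCategories, PySem.Dict.getD, PySem.Dict.get?,
      h1, h2, h3, h4, h5, h6, h7, h8, h9, h10, h11, h12, h13, h14, h15, h16, h17, h18, h19, h20, h21, h22, h23, h24, h25, h26, h27, h28, h29,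
      beq_ofList_false ".jpg" t h1, beq_ofList_false ".jpeg" t h2, beq_ofList_false ".png" t h3, beq_ofList_false ".gif" t h4, beq_ofList_false ".svg" t h5, beq_ofList_false ".webp" t h6, beq_ofList_false ".ico" t h7, beq_ofList_false ".bmp" t h8, beq_ofList_false ".js" t h9, beq_ofList_false ".css" t h10, beq_ofList_false ".woff" t h11, beq_ofList_false ".woff2" t h12, beq_ofList_false ".ttf" t h13, beq_ofList_false ".eot" t h14, beq_ofList_false ".otf" t h15, beq_ofList_false ".mp4" t h16, beq_ofList_false ".mp3" t h17, beq_ofList_false ".webm" t h18, beq_ofList_false ".ogg" t h19, beq_ofList_false ".wav" t h20, beq_ofList_false ".avi" t h21, beq_ofList_false ".pdf" t h22, beq_ofList_false ".doc" t h23, beq_ofList_false ".docx" t h24, beq_ofList_false ".xls" t h25, beq_ofList_false ".xlsx" t h26, beq_ofList_false ".zip" t h27, beq_ofList_false ".tar" t h28, beq_ofList_false ".gz" t h29]
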